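-- pv_equiv track=rewrite | github.com/peter890176/HealthInsuranceRAG | utils.py | parse_abstract_text
-- ===== SOURCE A (Python) =====
-- from typing import List, Dict, Optional
--
-- def parse_abstract_text(abstract_text: str) -> List[Dict]:
--     """
--     Parse plain text format abstracts
--
--     Args:
--         abstract_text: Abstract text
--
--     Returns:
--         Simplified article information list
--     """
--     articles = []
--     lines = abstract_text.strip().split('\n')
--
--     current_article = {}
--
--     for line in lines:
--         line = line.strip()
--         if not line:
--             continue
--
--         # Simple parsing logic, can be adjusted based on actual format
--         if line.startswith('PMID-'):
--             if current_article:
--                 articles.append(current_article)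
--             current_article = {"pmid": line[5:].strip()}
--         elif line.startswith('TI  -'):
--             current_article["title"] = line[5:].strip()
--         elif line.startswith('AB  -'):
--             current_article["abstract"] = line[5:].strip()
--
--     # Add the last article
--     if current_article:
--         articles.append(current_article)
--
--     return articles
-- ===== SOURCE B (Python) =====
-- from typing import List, Dict
--
-- def parse_abstract_text(abstract_text: str) -> List[Dict]:
--     # Two-pass: cut the cleaned lines into blocks at each PMID- line, then map each block to a dict.
--     cleaned = [l.strip() for l in abstract_text.strip().split('\n') if l.strip()]
--     blocks = []
--     cur = []
--     for line in cleaned: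
--         if line.startswith('PMID-'):
--             blocks.append(cur)
--             cur = [line]
--         else:
--             cur.append(line)
--     blocks.append(cur)
--
--     result = []
--     for block in blocks:
--         d = {}
--         for line in block:
--             if line.startswith('PMID-'):
--                 d["pmid"] = line[5:].strip()
--             elif line.startswith('TI  -'):
--                 d["title"] = line[5:].strip()
--             elif line.startswith('AB  -'):
--                 d["abstract"] = line[5:].strip()
--         if d:
--             result.append(d)
--     return result
-- ===== Notes on version B (the rewrite author's own statement) =====
-- stated objective: alternative
-- what changed: B replaces A's single stateful sweep (a current-article dict mutated while scanning) with two passes: first cut the cleaned lines into blocks at each PMID- line, then map each block independently to its dict and keep the non-empty ones.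
import Mathlib
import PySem

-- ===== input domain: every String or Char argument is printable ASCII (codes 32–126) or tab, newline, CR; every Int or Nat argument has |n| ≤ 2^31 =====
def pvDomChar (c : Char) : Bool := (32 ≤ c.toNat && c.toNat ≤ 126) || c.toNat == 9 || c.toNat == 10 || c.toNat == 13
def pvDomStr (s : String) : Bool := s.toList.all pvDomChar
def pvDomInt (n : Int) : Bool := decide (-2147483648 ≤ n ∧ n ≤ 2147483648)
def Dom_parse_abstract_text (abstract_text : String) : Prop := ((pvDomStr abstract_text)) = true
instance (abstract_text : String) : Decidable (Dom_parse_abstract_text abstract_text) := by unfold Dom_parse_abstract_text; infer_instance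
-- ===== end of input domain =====

-- B re-parses the text in two passes (cut cleaned lines into PMID-blocks, then map each block
-- to a dict) instead of A's single stateful sweep; objective: alternative decomposition.


-- ===== PORT A =====
-- one iteration of A's for-loop: state = (articles, current_article)
def parseAStep (st : List (PySem.Dict String String) × PySem.Dict String String) (line0 : String) :
    List (PySem.Dict String String) × PySem.Dict String String :=
  let line := PySem.Str.strip line0
  if line = "" then st
  else if PySem.Str.startswith line "PMID-" then
    ((if st.2.items ≠ [] then st.1 ++ [st.2] else st.1),
     PySem.Dict.empty.insert "pmid" (PySem.Str.strip (PySem.Str.slice line (some 5) none)))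
  else if PySem.Str.startswith line "TI  -" then
    (st.1, st.2.insert "title" (PySem.Str.strip (PySem.Str.slice line (some 5) none)))
  else if PySem.Str.startswith line "AB  -" then
    (st.1, st.2.insert "abstract" (PySem.Str.strip (PySem.Str.slice line (some 5) none)))
  else st

def parse_abstract_text (abstract_text : String) : List (List (String × String)) :=
  let lines := ((PySem.Str.split? (PySem.Str.strip abstract_text) "\n").getD [])
  let st := lines.foldl parseAStep ([], PySem.Dict.empty)
  let articles := if st.2.items ≠ [] then st.1 ++ [st.2] else st.1
  articles.map (·.items)

-- ===== PORT B =====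
-- first pass: cut the cleaned lines into blocks at each 'PMID-' line
def blockStepB (st : List (List String) × List String) (line : String) :
    List (List String) × List String :=
  if PySem.Str.startswith line "PMID-" then (st.1 ++ [st.2], [line]) else (st.1, st.2 ++ [line])

-- second pass: one block → one dict
def blockDictB (block : List String) : PySem.Dict String String :=
  block.foldl (fun d line =>
    if PySem.Str.startswith line "PMID-" then
      d.insert "pmid" (PySem.Str.strip (PySem.Str.slice line (some 5) none))
    else if PySem.Str.startswith line "TI  -" then
      d.insert "title" (PySem.Str.strip (PySem.Str.slice line (some 5) none))
    else if PySem.Str.startswith line "AB  -" then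
      d.insert "abstract" (PySem.Str.strip (PySem.Str.slice line (some 5) none))
    else d) PySem.Dict.empty

def parse_abstract_text_alt (abstract_text : String) : List (List (String × String)) :=
  let cleaned := (((PySem.Str.split? (PySem.Str.strip abstract_text) "\n").getD [])).filterMap
      (fun l => if PySem.Str.strip l = "" then none else some (PySem.Str.strip l))
  let st := cleaned.foldl blockStepB ([], [])
  let blocks := st.1 ++ [st.2]
  (((blocks.map blockDictB).filter (fun d => d.items ≠ [])).map (·.items))

-- ===== PRECONDITION & SPEC =====
def Spec_parse_abstract_text (abstract_text : String) (out : List (List (String × String))) : Prop := out = parse_abstract_text_alt abstract_text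
instance (abstract_text : String) (out : List (List (String × String))) : Decidable (Spec_parse_abstract_text abstract_text out) := by unfold Spec_parse_abstract_text; infer_instance

-- ===== CLAIM (what is proved, stated in full; the proofs are below) =====
def Claim_equal_parse_abstract_text : Prop := ∀ (abstract_text : String), Dom_parse_abstract_text abstract_text → Spec_parse_abstract_text abstract_text (parse_abstract_text abstract_text)

-- ===== LEMMAS AND PROOFS =====

-- A's loop body on an already-stripped non-empty line (the three-branch elif chain)
def coreA (st : List (PySem.Dict String String) × PySem.Dict String String) (line : String) :
    List (PySem.Dict String String) × PySem.Dict String String :=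
  if PySem.Str.startswith line "PMID-" then
    ((if st.2.items ≠ [] then st.1 ++ [st.2] else st.1),
     PySem.Dict.empty.insert "pmid" (PySem.Str.strip (PySem.Str.slice line (some 5) none)))
  else if PySem.Str.startswith line "TI  -" then
    (st.1, st.2.insert "title" (PySem.Str.strip (PySem.Str.slice line (some 5) none)))
  else if PySem.Str.startswith line "AB  -" then
    (st.1, st.2.insert "abstract" (PySem.Str.strip (PySem.Str.slice line (some 5) none)))
  else st

def cleanOf (lines : List String) : List String :=
  lines.filterMap (fun l => if PySem.Str.strip l = "" then none else some (PySem.Str.strip l))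

lemma foldl_parseAStep_clean (lines : List String)
    (st : List (PySem.Dict String String) × PySem.Dict String String) :
    lines.foldl parseAStep st = (cleanOf lines).foldl coreA st := by
  induction lines generalizing st with
  | nil => rfl
  | cons l ls ih =>
    by_cases h : PySem.Str.strip l = "" <;>
      simp [cleanOf, h, parseAStep, coreA, ih]

lemma foldl_blockStepB_shift (L : List String) (bs : List (List String)) (b : List String) :
    L.foldl blockStepB (bs, b) =
      (bs ++ (L.foldl blockStepB ([], b)).1, (L.foldl blockStepB ([], b)).2) := by
  induction L generalizing bs b with
  | nil => simp
  | cons l ls ih =>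
    simp only [List.foldl_cons]
    by_cases h : PySem.Chars.startswith l.toList ['P', 'M', 'I', 'D', '-'] = true
    · rw [show blockStepB (bs, b) l = (bs ++ [b], [l]) from by simp [blockStepB, h],
          show blockStepB (([] : List (List String)), b) l = ([b], [l]) from by simp [blockStepB, h],
          ih (bs ++ [b]) [l], ih [b] [l]]
      simp
    · rw [show blockStepB (bs, b) l = (bs, b ++ [l]) from by simp [blockStepB, h],
          show blockStepB (([] : List (List String)), b) l = ([], b ++ [l]) from by simp [blockStepB, h],
          ih bs (b ++ [l])]

-- A's final step (append the last article, take items)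
def finA (st : List (PySem.Dict String String) × PySem.Dict String String) :
    List (List (String × String)) :=
  (if st.2.items ≠ [] then st.1 ++ [st.2] else st.1).map (·.items)

-- B's result from a partially built current block b and remaining clean lines L
def resB (b : List String) (L : List String) : List (List (String × String)) :=
  let st := L.foldl blockStepB ([], b)
  ((((st.1 ++ [st.2]).map blockDictB).filter (fun d => d.items ≠ [])).map (·.items))

lemma main_invariant (L : List String) (arts : List (PySem.Dict String String))
    (b : List String) :
    finA (L.foldl coreA (arts, blockDictB b)) = arts.map (·.items) ++ resB b L := by
  induction L generalizing arts b with
  | nil =>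
    by_cases h : (blockDictB b).items = [] <;> simp [finA, resB, h]
  | cons l ls ih =>
    by_cases h1 : PySem.Chars.startswith l.toList ['P', 'M', 'I', 'D', '-'] = true
    · have hcur : PySem.Dict.empty.insert "pmid"
          (PySem.Str.strip (PySem.Str.slice l (some 5) none)) = blockDictB [l] := by
        simp [blockDictB, h1]
      have hstep : coreA (arts, blockDictB b) l =
          ((if (blockDictB b).items ≠ [] then arts ++ [blockDictB b] else arts), blockDictB [l]) := by
        simp [coreA, h1, hcur]
      rw [List.foldl_cons, hstep]
      by_cases h : (blockDictB b).items = []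
      · simp only [h, ne_eq, not_true_eq_false, if_false]
        rw [ih arts [l]]
        simp [resB, blockStepB, h1, foldl_blockStepB_shift ls [b] [l], h]
      · simp only [h, ne_eq, not_false_eq_true, if_true]
        rw [ih (arts ++ [blockDictB b]) [l]]
        simp [resB, blockStepB, h1, foldl_blockStepB_shift ls [b] [l], h]
    · have hblock : blockDictB (b ++ [l]) =
          (if PySem.Str.startswith l "TI  -" then
            (blockDictB b).insert "title" (PySem.Str.strip (PySem.Str.slice l (some 5) none))
          else if PySem.Str.startswith l "AB  -" then
            (blockDictB b).insert "abstract" (PySem.Str.strip (PySem.Str.slice l (some 5) none))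
          else blockDictB b) := by
        by_cases h2 : PySem.Chars.startswith l.toList ['T', 'I', ' ', ' ', '-'] = true <;>
          by_cases h3 : PySem.Chars.startswith l.toList ['A', 'B', ' ', ' ', '-'] = true <;>
          simp [blockDictB, List.foldl_append, h1, h2, h3]
      have hstep : coreA (arts, blockDictB b) l = (arts, blockDictB (b ++ [l])) := by
        rw [hblock]; by_cases h2 : PySem.Chars.startswith l.toList ['T', 'I', ' ', ' ', '-'] = true <;>
          by_cases h3 : PySem.Chars.startswith l.toList ['A', 'B', ' ', ' ', '-'] = true <;>
          simp [coreA, h1, h2, h3]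
      rw [List.foldl_cons, hstep, ih arts (b ++ [l])]
      simp [resB, blockStepB, h1]

-- ===== VERDICT (by name: the statement is the Claim_ definition above) =====
set_option maxHeartbeats 1000000 in
theorem parse_abstract_text_spec : Claim_equal_parse_abstract_text := by
  intro t _
  show parse_abstract_text t = parse_abstract_text_alt t
  have h := main_invariant (cleanOf (((PySem.Str.split? (PySem.Str.strip t) "\n").getD []))) [] []
  simp only [finA, resB, cleanOf, List.map_nil, List.nil_append,
    show blockDictB [] = (PySem.Dict.empty : PySem.Dict String String) from rfl] at h
  simp only [parse_abstract_text, parse_abstract_text_alt]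
  rw [foldl_parseAStep_clean]
  simp only [cleanOf]
  exact h
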